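-- pv_equiv track=rewrite | github.com/taifu/aoc | 2021/18/day_18.py | add
-- ===== SOURCE A (Python) =====
-- def add(snailfish, number, at_pos):
--     left, right = snailfish[:at_pos], snailfish[at_pos:]
--     original = ""
--     while left and left[-1].isdigit():
--         original, left = left[-1] + original, left[:-1]
--     while right and right[0].isdigit():
--         original, right = original + right[0], right[1:]
--     return left + str(number + int(original)) + right
-- ===== SOURCE B (Python) =====
-- def _digit_runs(s):
--     """One pass over s: the (start, end) half-open spans of all maximal digit runs."""
--     runs = []
--     start = None
--     for i, ch in enumerate(s):
--         if ch.isdigit():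
--             if start is None:
--                 start = i
--         else:
--             if start is not None:
--                 runs.append((start, i))
--                 start = None
--     if start is not None:
--         runs.append((start, len(s)))
--     return runs
--
--
-- def add(snailfish, number, at_pos):
--     n = len(snailfish)
--     k = min(at_pos, n) if at_pos >= 0 else max(n + at_pos, 0)
--     for start, end in _digit_runs(snailfish):
--         if start <= k <= end:
--             return snailfish[:start] + str(number + int(snailfish[start:end])) + snailfish[end:]
--     raise ValueError("no digit run adjacent to position")
-- ===== Notes on version B (the rewrite author's own statement) =====
-- stated objective: alternative
-- what changed: A peels digits outward from the split position with two while loops that repeatedly rebuild the left/right strings; B makes one pass that lists all maximal digit runs as (start, end) spans and then selects the span touching the split position, splicing the new number in by index.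
import Mathlib
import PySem

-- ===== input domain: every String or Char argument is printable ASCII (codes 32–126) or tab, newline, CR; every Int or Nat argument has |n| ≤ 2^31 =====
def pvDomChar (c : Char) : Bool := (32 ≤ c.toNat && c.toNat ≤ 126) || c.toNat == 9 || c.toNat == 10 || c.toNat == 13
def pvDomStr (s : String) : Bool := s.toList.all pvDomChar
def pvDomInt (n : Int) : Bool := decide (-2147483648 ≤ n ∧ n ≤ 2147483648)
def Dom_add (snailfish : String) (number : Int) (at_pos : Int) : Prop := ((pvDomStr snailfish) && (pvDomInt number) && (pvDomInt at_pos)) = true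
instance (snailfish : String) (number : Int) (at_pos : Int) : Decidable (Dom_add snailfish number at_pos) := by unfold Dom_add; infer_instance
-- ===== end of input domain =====

-- B replaces A's two quadratic cursor-out string-peeling loops by one pass that lists all
-- maximal digit runs and then selects the run touching the split position (objective: alternative).

-- ===== PORT A =====
-- while left and left[-1].isdigit(): original, left = left[-1] + original, left[:-1]
-- (left[-1] on a nonempty list is its last element; PySem.Chars.isdigit is '0' ≤ c ≤ '9',
--  exact for str.isdigit on the ASCII domain)
def peelL (left : List Char) (orig : List Char) : List Char × List Char :=
  if h : left ≠ [] ∧ PySem.Chars.isdigit (left.getLastD ' ') then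
    peelL left.dropLast (left.getLastD ' ' :: orig)
  else (left, orig)
termination_by left.length
decreasing_by
  have : left.length ≠ 0 := fun hl => h.1 (List.eq_nil_of_length_eq_zero hl)
  simp [List.length_dropLast]; omega

-- while right and right[0].isdigit(): original, right = original + right[0], right[1:]
def peelR (orig : List Char) (right : List Char) : List Char × List Char :=
  match right with
  | [] => (orig, [])
  | c :: rest =>
    if PySem.Chars.isdigit c then peelR (orig ++ [c]) rest else (orig, c :: rest)

def add (snailfish : String) (number : Int) (at_pos : Int) : String :=
  let cs := snailfish.toList
  let left := PySem.List.slice cs none (some at_pos)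
  let right := PySem.List.slice cs (some at_pos) none
  let r1 := peelL left []
  let r2 := peelR r1.2 right
  -- int(original): ValueError (original = "") is excluded by Pre_add, so .getD 0 is never hit there
  String.ofList (r1.1 ++ PySem.Int.toChars (number + (PySem.Int.ofChars? r2.1).getD 0) ++ r2.2)

-- ===== PORT B =====
-- _digit_runs: one pass with an optional open-run start, flushed at the end
def runsGo (cs : List Char) (i : Nat) (start? : Option Nat) (runs : List (Nat × Nat)) :
    List (Nat × Nat) :=
  match cs with
  | [] =>
    match start? with
    | some s => runs ++ [(s, i)]
    | none => runs
  | c :: rest =>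
    if PySem.Chars.isdigit c then
      match start? with
      | none => runsGo rest (i + 1) (some i) runs
      | some s => runsGo rest (i + 1) (some s) runs
    else
      match start? with
      | some s => runsGo rest (i + 1) none (runs ++ [(s, i)])
      | none => runsGo rest (i + 1) none runs

def add_alt (snailfish : String) (number : Int) (at_pos : Int) : String :=
  let cs := snailfish.toList
  let n := cs.length
  -- k = min(at_pos, n) if at_pos >= 0 else max(n + at_pos, 0)  (this is exactly clampIdx)
  let k := PySem.List.clampIdx n at_pos
  match (runsGo cs 0 none []).find? (fun pr => decide (pr.1 ≤ k) && decide (k ≤ pr.2)) with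
  | some (s, e) =>
    -- snailfish[:s] + str(number + int(snailfish[s:e])) + snailfish[e:], 0 ≤ s ≤ e ≤ n
    String.ofList (cs.take s ++
      PySem.Int.toChars (number + (PySem.Int.ofChars? ((cs.drop s).take (e - s))).getD 0) ++
      cs.drop e)
  | none => ""   -- Source B raises ValueError here; excluded by Pre_add

-- ===== PRECONDITION & SPEC =====
-- Pre_add excludes exactly the inputs where no digit is adjacent to the (clamped) split
-- position: there A raises ValueError (int("")), and B raises ValueError too.
def Pre_add (snailfish : String) (number : Int) (at_pos : Int) : Prop :=
  let cs := snailfish.toList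
  let k := PySem.List.clampIdx cs.length at_pos
  ((cs.take k).getLast?.any PySem.Chars.isdigit) = true
    ∨ ((cs.drop k).head?.any PySem.Chars.isdigit) = true
instance (snailfish : String) (number : Int) (at_pos : Int) :
    Decidable (Pre_add snailfish number at_pos) := by unfold Pre_add; infer_instance

def pvWitness_add : String × Int × Int := ("[1,25]", 3, 4)

def Spec_add (snailfish : String) (number : Int) (at_pos : Int) (out : String) : Prop :=
  out = add_alt snailfish number at_pos
instance (snailfish : String) (number : Int) (at_pos : Int) (out : String) :
    Decidable (Spec_add snailfish number at_pos out) := by unfold Spec_add; infer_instance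

-- ===== CLAIM (what is proved, stated in full; the proofs are below) =====
def Claim_equal_add : Prop := ∀ (snailfish : String) (number : Int) (at_pos : Int), Dom_add snailfish number at_pos → Pre_add snailfish number at_pos → Spec_add snailfish number at_pos (add snailfish number at_pos)

-- ===== LEMMAS AND PROOFS =====

-- abbreviations used only by the proofs:
-- length of the maximal digit run ending at position k (inside the first k chars)
def pfx (cs : List Char) (k : Nat) : Nat :=
  ((cs.take k).reverse.takeWhile PySem.Chars.isdigit).length
-- length of the maximal digit run starting at position k
def sfx (cs : List Char) (k : Nat) : Nat :=
  ((cs.drop k).takeWhile PySem.Chars.isdigit).length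

theorem takeWhile_eq_take_length {α : Type} (p : α → Bool) (l : List α) :
    l.takeWhile p = l.take (l.takeWhile p).length := by
  induction l with
  | nil => rfl
  | cons a l ih =>
    by_cases h : p a
    · simp [List.takeWhile_cons, h, ih.symm]
    · simp [List.takeWhile_cons, h]

theorem dropWhile_eq_drop_length {α : Type} (p : α → Bool) (l : List α) :
    l.dropWhile p = l.drop (l.takeWhile p).length := by
  induction l with
  | nil => rfl
  | cons a l ih =>
    by_cases h : p a
    · simp [List.takeWhile_cons, List.dropWhile_cons, h, ih]
    · simp [List.takeWhile_cons, List.dropWhile_cons, h]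

theorem takeWhile_dropWhile_nil {α : Type} (p : α → Bool) (l : List α) :
    (l.dropWhile p).takeWhile p = [] := by
  induction l with
  | nil => rfl
  | cons a l ih =>
    by_cases h : p a
    · simpa [List.dropWhile_cons, h] using ih
    · simp [List.dropWhile_cons, List.takeWhile_cons, h]

theorem pfx_le (cs : List Char) (k : Nat) : pfx cs k ≤ k := by
  have h1 := (List.takeWhile_prefix (l := (cs.take k).reverse)
    (p := PySem.Chars.isdigit)).length_le
  have h2 : (cs.take k).length ≤ k := List.length_take_le _ _
  simp only [List.length_reverse] at h1
  exact le_trans (by simpa [pfx] using h1) h2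

-- peelL unrolls one step on a snoc
theorem peelL_concat (xs : List Char) (c : Char) (orig : List Char) :
    peelL (xs ++ [c]) orig =
      if PySem.Chars.isdigit c then peelL xs (c :: orig) else (xs ++ [c], orig) := by
  rw [peelL]
  by_cases h : PySem.Chars.isdigit c <;>
    simp [List.getLastD_concat, List.dropLast_concat, h]

-- characterization of A's first while loop
theorem peelL_eq (l orig : List Char) :
    peelL l orig = ((l.reverse.dropWhile PySem.Chars.isdigit).reverse,
      (l.reverse.takeWhile PySem.Chars.isdigit).reverse ++ orig) := by
  induction l using List.reverseRecOn generalizing orig with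
  | nil => rw [peelL]; simp
  | append_singleton xs c ih =>
    rw [peelL_concat]
    by_cases h : PySem.Chars.isdigit c
    · rw [if_pos h, ih]
      simp [List.takeWhile_cons, List.dropWhile_cons, h]
    · rw [if_neg h]
      simp [List.takeWhile_cons, List.dropWhile_cons, h]

-- characterization of A's second while loop
theorem peelR_eq (orig r : List Char) :
    peelR orig r = (orig ++ r.takeWhile PySem.Chars.isdigit,
      r.dropWhile PySem.Chars.isdigit) := by
  induction r generalizing orig with
  | nil => simp [peelR]
  | cons c rest ih =>
    by_cases h : PySem.Chars.isdigit c
    · simp [peelR, h, ih, List.takeWhile_cons, List.dropWhile_cons]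
    · simp [peelR, h, List.takeWhile_cons, List.dropWhile_cons]

-- reference form of B's run builder: spans produced by repeated span-splitting
def spanRuns (cs : List Char) (i : Nat) : List (Nat × Nat) :=
  match cs with
  | c :: rest =>
    if PySem.Chars.isdigit c then
      (i, i + 1 + (rest.takeWhile PySem.Chars.isdigit).length) ::
        spanRuns (rest.dropWhile PySem.Chars.isdigit)
          (i + 1 + (rest.takeWhile PySem.Chars.isdigit).length)
    else spanRuns rest (i + 1)
  | [] => []
termination_by cs.length
decreasing_by
  · have := List.length_dropWhile_le PySem.Chars.isdigit rest; simp; omega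
  · simp

theorem runsGo_eq_spanRuns (cs : List Char) :
    ∀ (i : Nat) (acc : List (Nat × Nat)),
      (runsGo cs i none acc = acc ++ spanRuns cs i) ∧
      (∀ s, runsGo cs i (some s) acc =
        acc ++ (s, i + (cs.takeWhile PySem.Chars.isdigit).length) ::
          spanRuns (cs.dropWhile PySem.Chars.isdigit)
            (i + (cs.takeWhile PySem.Chars.isdigit).length)) := by
  induction cs with
  | nil =>
    intro i acc
    refine ⟨by simp [runsGo, spanRuns], fun s => by simp [runsGo, spanRuns]⟩
  | cons c rest ih =>
    intro i acc
    by_cases h : PySem.Chars.isdigit c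
    · refine ⟨?_, fun s => ?_⟩
      · rw [runsGo]; simp only [h, if_pos]
        rw [(ih (i+1) acc).2 i, spanRuns]
        have : i + 1 + (rest.takeWhile PySem.Chars.isdigit).length
            = i + ((rest.takeWhile PySem.Chars.isdigit).length + 1) := by omega
        simp only [h, if_pos, List.takeWhile_cons, List.dropWhile_cons, List.length_cons, this]
      · rw [runsGo]; simp only [h, if_pos]
        rw [(ih (i+1) acc).2 s]
        have : i + 1 + (rest.takeWhile PySem.Chars.isdigit).length
            = i + ((rest.takeWhile PySem.Chars.isdigit).length + 1) := by omega
        simp only [h, if_pos, List.takeWhile_cons, List.dropWhile_cons, List.length_cons, this]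
    · refine ⟨?_, fun s => ?_⟩
      · rw [runsGo]; simp only [h, if_neg, Bool.false_eq_true, not_false_iff]
        rw [(ih (i+1) acc).1]
        conv_rhs => rw [spanRuns.eq_def]
        simp [h]
      · rw [runsGo]; simp only [h, if_neg, Bool.false_eq_true, not_false_iff]
        rw [(ih (i+1) (acc ++ [(s, i)])).1]
        conv_rhs => rw [spanRuns.eq_def]
        simp [h, List.takeWhile_cons, List.dropWhile_cons]

theorem head_dropWhile_false {α : Type} (p : α → Bool) (l : List α) (x : α) (xs : List α)
    (h : l.dropWhile p = x :: xs) : p x = false := by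
  induction l with
  | nil => simp at h
  | cons a l ih =>
    by_cases hp : p a
    · exact ih (by simpa [List.dropWhile_cons, hp] using h)
    · rw [List.dropWhile_cons, if_neg (by simpa using hp)] at h
      cases h; simpa using hp

-- a digit-run prefix: the first k characters of T ++ D are all digits when k ≤ |T|
theorem take_all_digits (cs : List Char) (k : Nat)
    (hk : k ≤ (cs.takeWhile PySem.Chars.isdigit).length) :
    ∀ x ∈ cs.take k, PySem.Chars.isdigit x = true := by
  intro x hx
  have h1 : cs.take k = (cs.takeWhile PySem.Chars.isdigit).take k := by
    conv_lhs => rw [← List.takeWhile_append_dropWhile (p := PySem.Chars.isdigit) (l := cs)]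
    exact List.take_append_of_le_length hk
  rw [h1] at hx
  exact List.mem_takeWhile_imp (List.mem_of_mem_take hx)

-- a takeWhile over something ending in all-digit material stops before the appendix
theorem takeWhile_append_of_not_all (X Y : List Char)
    (hX : ∃ x ∈ X, PySem.Chars.isdigit x = false) :
    (X ++ Y).takeWhile PySem.Chars.isdigit = X.takeWhile PySem.Chars.isdigit := by
  rw [List.takeWhile_append]
  split
  · next hc =>
    obtain ⟨x, hx, hxd⟩ := hX
    have heq : X.takeWhile PySem.Chars.isdigit = X :=
      (List.takeWhile_prefix _).eq_of_length hc
    have := List.mem_takeWhile_imp (l := X) (p := PySem.Chars.isdigit) (by rw [heq]; exact hx)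
    simp [hxd] at this
  · rfl

-- the central lemma: the run that B's find? selects is exactly the span A peels out
theorem find_spanRuns (n : Nat) : ∀ (cs : List Char), cs.length ≤ n → ∀ (i k : Nat),
    k ≤ cs.length → 0 < pfx cs k + sfx cs k →
    (spanRuns cs i).find? (fun pr => decide (pr.1 ≤ i + k) && decide (i + k ≤ pr.2))
      = some (i + (k - pfx cs k), i + (k + sfx cs k)) := by
  induction n with
  | zero =>
    intro cs hn i k hk hpq
    have : cs = [] := List.eq_nil_of_length_eq_zero (by omega)
    subst this
    have : k = 0 := by omega
    subst this
    simp [pfx, sfx] at hpq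
  | succ n ihn =>
    intro cs hn i k hk hpq
    match cs with
    | [] =>
      have : k = 0 := by simpa using hk
      subst this
      simp [pfx, sfx] at hpq
    | c :: rest =>
      have hk' : k ≤ rest.length + 1 := by simpa using hk
      have hn' : rest.length ≤ n := by simpa using hn
      by_cases h : PySem.Chars.isdigit c
      · -- head of a digit run of length 1 + W where W = (rest.takeWhile PySem.Chars.isdigit).length
        rw [spanRuns, if_pos h]
        have hTlen : ((c :: rest).takeWhile PySem.Chars.isdigit).length = 1 + (rest.takeWhile PySem.Chars.isdigit).length := by
          simp [List.takeWhile_cons, h]; omega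
        by_cases hkL : k ≤ 1 + (rest.takeWhile PySem.Chars.isdigit).length
        · -- the split position touches the head run: it is selected
          rw [List.find?_cons_of_pos (by simp; omega)]
          have hall : ∀ x ∈ (c :: rest).take k, PySem.Chars.isdigit x = true :=
            take_all_digits _ _ (by omega)
          have hpfx : pfx (c :: rest) k = k := by
            have h2 : ((c :: rest).take k).reverse.takeWhile PySem.Chars.isdigit
                = ((c :: rest).take k).reverse := by
              rw [List.takeWhile_eq_self_iff]
              intro x hx
              exact hall x (by simpa using hx)
            have h3 : ((c :: rest).take k).length = k := by
              rw [List.length_take]; simp; omega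
            unfold pfx
            rw [h2, List.length_reverse, h3]
          have hsfx : sfx (c :: rest) k = 1 + (rest.takeWhile PySem.Chars.isdigit).length - k := by
            have hsplit : (c :: rest) = (c :: rest).takeWhile PySem.Chars.isdigit
                ++ (c :: rest).dropWhile PySem.Chars.isdigit :=
              (List.takeWhile_append_dropWhile).symm
            have hdrop : (c :: rest).drop k
                = ((c :: rest).takeWhile PySem.Chars.isdigit).drop k
                  ++ (c :: rest).dropWhile PySem.Chars.isdigit := by
              conv_lhs => rw [hsplit]
              rw [List.drop_append]
              have h0 : k - ((c :: rest).takeWhile PySem.Chars.isdigit).length = 0 := by omega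
              rw [h0, List.drop_zero]
            have hTdrop : ∀ x ∈ ((c :: rest).takeWhile PySem.Chars.isdigit).drop k,
                PySem.Chars.isdigit x = true := fun x hx =>
              List.mem_takeWhile_imp (List.mem_of_mem_drop hx)
            have htw : ((c :: rest).drop k).takeWhile PySem.Chars.isdigit
                = ((c :: rest).takeWhile PySem.Chars.isdigit).drop k
                  ++ ((c :: rest).dropWhile PySem.Chars.isdigit).takeWhile
                    PySem.Chars.isdigit := by
              rw [hdrop, List.takeWhile_append]
              rw [List.takeWhile_eq_self_iff.mpr hTdrop]
              simp
            unfold sfx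
            rw [htw, takeWhile_dropWhile_nil]
            simp [hTlen]
          rw [hpfx, hsfx]
          simp only [Option.some.injEq, Prod.mk.injEq]
          constructor <;> omega
        · -- the split position lies beyond the head run: skip it and recurse
          rw [List.find?_cons_of_neg (by simp; omega)]
          have hsplitc : (c :: rest) = (c :: rest).takeWhile PySem.Chars.isdigit
              ++ rest.dropWhile PySem.Chars.isdigit := by
            conv_rhs => rw [← List.dropWhile_cons_of_pos h]
            exact (List.takeWhile_append_dropWhile).symm
          have hlen : rest.length + 1 = (1 + (rest.takeWhile PySem.Chars.isdigit).length) + (rest.dropWhile PySem.Chars.isdigit).length := by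
            have := congrArg List.length hsplitc
            simpa [hTlen] using this
          have hk2le : k - (1 + (rest.takeWhile PySem.Chars.isdigit).length) ≤ (rest.dropWhile PySem.Chars.isdigit).length := by omega
          have hk2pos : 0 < k - (1 + (rest.takeWhile PySem.Chars.isdigit).length) := by omega
          have htake : (c :: rest).take k
              = ((c :: rest).takeWhile PySem.Chars.isdigit)
                ++ (rest.dropWhile PySem.Chars.isdigit).take (k - (1 + (rest.takeWhile PySem.Chars.isdigit).length)) := by
            conv_lhs => rw [hsplitc]
            rw [List.take_append, List.take_of_length_le (by omega), hTlen]
          have hdropk : (c :: rest).drop k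
              = (rest.dropWhile PySem.Chars.isdigit).drop (k - (1 + (rest.takeWhile PySem.Chars.isdigit).length)) := by
            conv_lhs => rw [hsplitc]
            rw [List.drop_append, List.drop_of_length_le (by omega), hTlen]
            simp
          obtain ⟨d, D', hDcons⟩ : ∃ d D', rest.dropWhile PySem.Chars.isdigit = d :: D' := by
            cases hD' : rest.dropWhile PySem.Chars.isdigit with
            | nil => rw [hD'] at hk2le; simp at hk2le; omega
            | cons d D' => exact ⟨d, D', rfl⟩
          have hdnotdig : PySem.Chars.isdigit d = false :=
            head_dropWhile_false _ rest d D' hDcons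
          have hpfx : pfx (c :: rest) k = pfx (rest.dropWhile PySem.Chars.isdigit) (k - (1 + (rest.takeWhile PySem.Chars.isdigit).length)) := by
            have hex : ∃ x ∈ ((rest.dropWhile PySem.Chars.isdigit).take
                (k - (1 + (rest.takeWhile PySem.Chars.isdigit).length))).reverse,
                PySem.Chars.isdigit x = false := by
              refine ⟨d, ?_, hdnotdig⟩
              simp only [List.mem_reverse]
              rw [hDcons]
              obtain ⟨m, hm⟩ := Nat.exists_eq_succ_of_ne_zero (Nat.pos_iff_ne_zero.mp hk2pos)
              rw [hm]
              simp [List.take_succ_cons]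
            unfold pfx
            rw [htake, List.reverse_append, takeWhile_append_of_not_all _ _ hex]
          have hsfx : sfx (c :: rest) k = sfx (rest.dropWhile PySem.Chars.isdigit) (k - (1 + (rest.takeWhile PySem.Chars.isdigit).length)) := by
            unfold sfx
            rw [hdropk]
          have harith : (i + 1 + (rest.takeWhile PySem.Chars.isdigit).length) + (k - (1 + (rest.takeWhile PySem.Chars.isdigit).length)) = i + k := by omega
          have hrec := ihn (rest.dropWhile PySem.Chars.isdigit) (by omega)
            (i + 1 + (rest.takeWhile PySem.Chars.isdigit).length) (k - (1 + (rest.takeWhile PySem.Chars.isdigit).length)) hk2le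
            (by rw [hpfx, hsfx] at hpq; exact hpq)
          rw [harith] at hrec
          rw [hrec, hpfx, hsfx]
          have h1 := pfx_le (rest.dropWhile PySem.Chars.isdigit) (k - (1 + (rest.takeWhile PySem.Chars.isdigit).length))
          simp only [Option.some.injEq, Prod.mk.injEq]
          constructor <;> omega
      · -- head is not a digit: shift by one
        rw [spanRuns, if_neg h]
        have hk0 : k ≠ 0 := by
          intro hk0
          subst hk0
          simp [pfx, sfx, List.takeWhile_cons, h] at hpq
        obtain ⟨k', rfl⟩ := Nat.exists_eq_succ_of_ne_zero hk0
        have hpfx : pfx (c :: rest) (k' + 1) = pfx rest k' := by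
          unfold pfx
          rw [List.take_succ_cons, List.reverse_cons, List.takeWhile_append]
          split
          · next hc =>
            have he : List.takeWhile PySem.Chars.isdigit [c] = [] := by
              simp [List.takeWhile_cons, h]
            rw [he, List.append_nil]
            exact hc.symm
          · rfl
        have hsfx : sfx (c :: rest) (k' + 1) = sfx rest k' := by
          unfold sfx
          rw [List.drop_succ_cons]
        have harith : (i + 1) + k' = i + (k' + 1) := by omega
        have hrec := ihn rest hn' (i + 1) k'
          (by omega) (by rw [hpfx, hsfx] at hpq; exact hpq)
        rw [harith] at hrec
        rw [hrec, hpfx, hsfx]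
        have h1 := pfx_le rest k'
        simp only [Option.some.injEq, Prod.mk.injEq]
        constructor <;> omega

theorem takeWhile_pos_iff {α : Type} (p : α → Bool) (l : List α) :
    0 < (l.takeWhile p).length ↔ l.head?.any p = true := by
  cases l with
  | nil => simp
  | cons a l =>
    by_cases h : p a <;> simp [List.takeWhile_cons, h]

-- A's peeled-out left context is the prefix up to the start of the run
theorem left_eq (cs : List Char) (k : Nat) (hk : k ≤ cs.length) :
    ((cs.take k).reverse.dropWhile PySem.Chars.isdigit).reverse = cs.take (k - pfx cs k) := by
  have hlen : (cs.take k).length = k := by rw [List.length_take]; omega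
  have hp := pfx_le cs k
  rw [dropWhile_eq_drop_length]
  rw [show ((cs.take k).reverse.takeWhile PySem.Chars.isdigit).length = pfx cs k from rfl]
  rw [List.drop_reverse, List.reverse_reverse, hlen, List.take_take]
  congr 1
  omega

-- A's peeled-out digits left of the cursor are the slice from the run start to the cursor
theorem midL_eq (cs : List Char) (k : Nat) (hk : k ≤ cs.length) :
    ((cs.take k).reverse.takeWhile PySem.Chars.isdigit).reverse
      = (cs.drop (k - pfx cs k)).take (pfx cs k) := by
  have hlen : (cs.take k).length = k := by rw [List.length_take]; omega
  have hp := pfx_le cs k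
  conv_lhs => rw [takeWhile_eq_take_length]
  rw [show ((cs.take k).reverse.takeWhile PySem.Chars.isdigit).length = pfx cs k from rfl]
  rw [List.take_reverse, List.reverse_reverse, hlen, List.drop_take]
  congr 1
  omega

-- A's peeled-out middle is exactly the digit run B's selected span denotes
theorem mid_eq (cs : List Char) (k : Nat) (hk : k ≤ cs.length) :
    ((cs.take k).reverse.takeWhile PySem.Chars.isdigit).reverse
        ++ (cs.drop k).takeWhile PySem.Chars.isdigit
      = (cs.drop (k - pfx cs k)).take (k + sfx cs k - (k - pfx cs k)) := by
  have hp := pfx_le cs k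
  have harith : k + sfx cs k - (k - pfx cs k) = pfx cs k + sfx cs k := by omega
  rw [harith, List.take_add, midL_eq cs k hk, List.drop_drop]
  congr 1
  · rw [show k - pfx cs k + pfx cs k = k by omega]
    conv_lhs => rw [takeWhile_eq_take_length]
    rfl

-- A's remaining right context is the suffix from the end of the run
theorem right_eq (cs : List Char) (k : Nat) :
    (cs.drop k).dropWhile PySem.Chars.isdigit = cs.drop (k + sfx cs k) := by
  rw [dropWhile_eq_drop_length]
  rw [show ((cs.drop k).takeWhile PySem.Chars.isdigit).length = sfx cs k from rfl]
  rw [List.drop_drop]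

-- Pre_add says exactly that the digit run at the split position is nonempty
theorem pre_pos (snailfish : String) (number at_pos : Int)
    (hpre : Pre_add snailfish number at_pos) :
    0 < pfx snailfish.toList (PySem.List.clampIdx snailfish.toList.length at_pos)
      + sfx snailfish.toList (PySem.List.clampIdx snailfish.toList.length at_pos) := by
  unfold Pre_add at hpre
  rcases hpre with h | h
  · have := (takeWhile_pos_iff PySem.Chars.isdigit
      (snailfish.toList.take (PySem.List.clampIdx snailfish.toList.length at_pos)).reverse).mpr
      (by rwa [← List.getLast?_eq_head?_reverse])
    unfold pfx
    omega
  · have := (takeWhile_pos_iff PySem.Chars.isdigit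
      (snailfish.toList.drop (PySem.List.clampIdx snailfish.toList.length at_pos))).mpr h
    unfold sfx
    omega

theorem slice_none_some (cs : List Char) (a : Int) :
    PySem.List.slice cs none (some a) = cs.take (PySem.List.clampIdx cs.length a) := by
  simp [PySem.List.slice]

-- ===== VERDICT (by name: the statement is the Claim_ definition above) =====
theorem add_spec : Claim_equal_add := by
  intro snailfish number at_pos _hdom hpre
  unfold Spec_add
  have hk : PySem.List.clampIdx snailfish.toList.length at_pos ≤ snailfish.toList.length :=
    PySem.List.clampIdx_le _ _
  have hpq := pre_pos snailfish number at_pos hpre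
  have hfind := find_spanRuns snailfish.toList.length snailfish.toList le_rfl 0
    (PySem.List.clampIdx snailfish.toList.length at_pos) hk hpq
  simp only [Nat.zero_add] at hfind
  simp only [add, add_alt, slice_none_some, PySem.List.slice_some_none]
  rw [show runsGo snailfish.toList 0 none [] = spanRuns snailfish.toList 0 by
    simpa using (runsGo_eq_spanRuns snailfish.toList 0 []).1]
  rw [hfind]
  rw [peelL_eq, peelR_eq]
  simp only [List.append_nil]
  rw [left_eq _ _ hk, mid_eq _ _ hk, right_eq]
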